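-- pv_equiv track=rewrite | github.com/franza73/adventofcode2022 | day15.py | n_positions_with_no_beacon
-- ===== SOURCE A (Python) =====
-- def n_positions_with_no_beacon(points, line):
--     "Count positions with no beacon for a line specified"
--     lst = []
--     beacon_in_line = set()
--     for point in points:
--         sensor, beacon = point[0:2], point[2:4]
--         if beacon[1] == line:
--             beacon_in_line.add(tuple(beacon))
--         d_sl = abs(sensor[1] - line)
--         d_sb = abs(sensor[0] - beacon[0]) + abs(sensor[1] - beacon[1])
--         if d_sl <= d_sb:
--             delta = d_sb - d_sl
--             lst += [[sensor[0]-delta, sensor[0]+delta]]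
--     lst.sort()
--     assert len(lst) > 0
--     res = []
--     for lst_i in lst:
--         if res and lst_i[0] <= res[-1][1]:
--             res[-1][1] = max(res[-1][1], lst_i[1])
--         else:
--             res += [lst_i]
--     d_res = 0
--     for pt1, pt2 in res:
--         d_res += pt2 - pt1 + 1
--     return d_res - len(beacon_in_line)
-- ===== SOURCE B (Python) =====
-- def n_positions_with_no_beacon(points, line):
--     "Count positions with no beacon for a line specified"
--     lst = []
--     beacon_in_line = set()
--     for point in points:
--         sensor, beacon = point[0:2], point[2:4]
--         if beacon[1] == line:
--             beacon_in_line.add(tuple(beacon))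
--         d_sl = abs(sensor[1] - line)
--         d_sb = abs(sensor[0] - beacon[0]) + abs(sensor[1] - beacon[1])
--         if d_sl <= d_sb:
--             delta = d_sb - d_sl
--             lst += [[sensor[0]-delta, sensor[0]+delta]]
--     assert len(lst) > 0
--     events = []
--     for lo, hi in lst:
--         events += [(lo, 1), (hi + 1, -1)]
--     events.sort()
--     covered = 0
--     active = 0
--     prev = events[0][0]
--     for x, d in events:
--         if active > 0:
--             covered += x - prev
--         prev = x
--         active += d
--     return covered - len(beacon_in_line)
-- ===== Notes on version B (the rewrite author's own statement) =====
-- stated objective: alternative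
-- what changed: Replaces the sort-intervals-then-merge-into-a-list-and-sum pass with an event sweep: each interval becomes (start,+1)/(end+1,-1) events, which are sorted and swept with a running active counter that accumulates covered length between consecutive event coordinates.
import Mathlib
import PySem

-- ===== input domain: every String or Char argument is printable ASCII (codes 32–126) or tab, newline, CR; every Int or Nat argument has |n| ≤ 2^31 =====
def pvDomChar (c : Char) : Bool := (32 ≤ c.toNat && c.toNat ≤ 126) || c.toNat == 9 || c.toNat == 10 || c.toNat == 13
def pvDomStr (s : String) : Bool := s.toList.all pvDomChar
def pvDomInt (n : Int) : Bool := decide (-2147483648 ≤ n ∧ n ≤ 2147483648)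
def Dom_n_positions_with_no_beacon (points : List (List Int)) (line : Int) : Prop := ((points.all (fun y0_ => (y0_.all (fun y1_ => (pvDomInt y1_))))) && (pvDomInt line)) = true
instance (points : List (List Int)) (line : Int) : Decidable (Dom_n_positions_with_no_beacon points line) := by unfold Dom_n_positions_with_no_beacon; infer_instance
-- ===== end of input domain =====

-- B replaces A's sort-intervals/merge-into-list/sum pass by a sorted (start,+1)/(end+1,-1)
-- event sweep with a running active counter; same interval-building first loop, same result.

-- ===== PORT A =====
-- shared helpers for the first loop, which is textually identical in Source A and Source B:
-- d_sl, d_sb and the interval [sensor0-delta, sensor0+delta] of one point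
def pvDsl (line : Int) (point : List Int) : Int :=
  |PySem.List.pyGetD point 1 0 - line|
def pvDsb (point : List Int) : Int :=
  |PySem.List.pyGetD point 0 0 - PySem.List.pyGetD point 2 0| +
  |PySem.List.pyGetD point 1 0 - PySem.List.pyGetD point 3 0|
def pvIv (line : Int) (point : List Int) : Int × Int :=
  (PySem.List.pyGetD point 0 0 - (pvDsb point - pvDsl line point),
   PySem.List.pyGetD point 0 0 + (pvDsb point - pvDsl line point))
-- the first loop of both Pythons: builds (lst, beacon_in_line)
-- (point[i] is read with pyGetD; Pre_ guarantees 4 ≤ len(point), where Python indexes successfully)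
def pvScan (points : List (List Int)) (line : Int) :
    List (Int × Int) × PySem.Set (Int × Int) :=
  points.foldl (fun st point =>
    (if pvDsl line point ≤ pvDsb point then st.1 ++ [pvIv line point] else st.1,
     if PySem.List.pyGetD point 3 0 = line then
       PySem.Set.add st.2 (PySem.List.pyGetD point 2 0, PySem.List.pyGetD point 3 0)
     else st.2))
    ([], PySem.Set.empty)

def n_positions_with_no_beacon (points : List (List Int)) (line : Int) : Int :=
  let st := pvScan points line
  let lst := PySem.List.sorted2 st.1 Prod.fst Prod.snd
  let res := lst.foldl (fun res p =>
    match res.getLast? with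
    | some last => if p.1 ≤ last.2 then res.dropLast ++ [(last.1, max last.2 p.2)] else res ++ [p]
    | none => res ++ [p]) ([] : List (Int × Int))
  let d_res := res.foldl (fun acc p => acc + (p.2 - p.1 + 1)) (0 : Int)
  d_res - PySem.Set.len st.2

-- ===== PORT B =====
def n_positions_with_no_beacon_alt (points : List (List Int)) (line : Int) : Int :=
  let st := pvScan points line
  let events := st.1.foldl (fun es p => es ++ [(p.1, (1 : Int)), (p.2 + 1, (-1 : Int))])
    ([] : List (Int × Int))
  let evs := PySem.List.sorted2 events Prod.fst Prod.snd
  let fin := evs.foldl (fun (acc : Int × Int × Int) e =>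
      (if acc.2.1 > 0 then acc.1 + (e.1 - acc.2.2) else acc.1, acc.2.1 + e.2, e.1))
    (0, 0, (PySem.List.pyGetD evs 0 (0, 0)).1)
  fin.1 - PySem.Set.len st.2

-- ===== PRECONDITION & SPEC =====
-- Pre_ excludes exactly the inputs where the Python raises: a point with fewer than 4
-- coordinates (IndexError on beacon[1]/sensor[1]) and inputs where no sensor reaches the
-- line, so lst is empty (AssertionError; both Source A and Source B carry the assert).
def Pre_n_positions_with_no_beacon (points : List (List Int)) (line : Int) : Prop :=
  (∀ p ∈ points, 4 ≤ p.length) ∧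
  ∃ p ∈ points, |p.getD 1 0 - line| ≤ |p.getD 0 0 - p.getD 2 0| + |p.getD 1 0 - p.getD 3 0|
instance (points : List (List Int)) (line : Int) : Decidable (Pre_n_positions_with_no_beacon points line) := by unfold Pre_n_positions_with_no_beacon; infer_instance
def pvWitness_n_positions_with_no_beacon : List (List Int) × Int := ([[0, 0, 0, 0]], 0)

def Spec_n_positions_with_no_beacon (points : List (List Int)) (line : Int) (out : Int) : Prop := out = n_positions_with_no_beacon_alt points line
instance (points : List (List Int)) (line : Int) (out : Int) : Decidable (Spec_n_positions_with_no_beacon points line out) := by unfold Spec_n_positions_with_no_beacon; infer_instance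

-- ===== CLAIM (what is proved, stated in full; the proofs are below) =====
def Claim_equal_n_positions_with_no_beacon : Prop := ∀ (points : List (List Int)) (line : Int), Dom_n_positions_with_no_beacon points line → Pre_n_positions_with_no_beacon points line → Spec_n_positions_with_no_beacon points line (n_positions_with_no_beacon points line)

-- ===== LEMMAS AND PROOFS =====

-- the set of integers covered by a list of closed intervals (proof-only helper)
noncomputable def ivUnion (L : List (Int × Int)) : Finset Int :=
  L.foldr (fun p s => Finset.Icc p.1 p.2 ∪ s) ∅

theorem ivUnion_cons (q : Int × Int) (L : List (Int × Int)) :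
    ivUnion (q :: L) = Finset.Icc q.1 q.2 ∪ ivUnion L := rfl

-- A's merge loop, recast as a recursion on the (sorted) interval list carrying the open interval
def mergeRec : Int → Int → List (Int × Int) → Int
  | a, b, [] => b - a + 1
  | a, b, (lo, hi) :: ls =>
    if lo ≤ b then mergeRec a (max b hi) ls else (b - a + 1) + mergeRec lo hi ls

-- B's sweep loop, recast as a recursion carrying (active, prev)
def sweepGo : Int → Int → List (Int × Int) → Int
  | _, _, [] => 0
  | a, p, (x, d) :: es => (if a > 0 then x - p else 0) + sweepGo (a + d) x es

-- sum of the deltas of the events at coordinates ≤ y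
def deltaUpTo (es : List (Int × Int)) (y : Int) : Int :=
  ((es.filter (fun e => decide (e.1 ≤ y))).map Prod.snd).sum

-- A's middle+last section / B's middle+last section, as functions of the built lst
def pvMergeSum (L : List (Int × Int)) : Int :=
  let lst := PySem.List.sorted2 L Prod.fst Prod.snd
  let res := lst.foldl (fun res p =>
    match res.getLast? with
    | some last => if p.1 ≤ last.2 then res.dropLast ++ [(last.1, max last.2 p.2)] else res ++ [p]
    | none => res ++ [p]) ([] : List (Int × Int))
  res.foldl (fun acc p => acc + (p.2 - p.1 + 1)) (0 : Int)

def pvSweepSum (L : List (Int × Int)) : Int :=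
  let events := L.foldl (fun es p => es ++ [(p.1, (1 : Int)), (p.2 + 1, (-1 : Int))])
    ([] : List (Int × Int))
  let evs := PySem.List.sorted2 events Prod.fst Prod.snd
  (evs.foldl (fun (acc : Int × Int × Int) e =>
      (if acc.2.1 > 0 then acc.1 + (e.1 - acc.2.2) else acc.1, acc.2.1 + e.2, e.1))
    (0, 0, (PySem.List.pyGetD evs 0 (0, 0)).1)).1

theorem portA_eq (points : List (List Int)) (line : Int) :
    n_positions_with_no_beacon points line
      = pvMergeSum (pvScan points line).1 - PySem.Set.len (pvScan points line).2 := rfl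

theorem portB_eq (points : List (List Int)) (line : Int) :
    n_positions_with_no_beacon_alt points line
      = pvSweepSum (pvScan points line).1 - PySem.Set.len (pvScan points line).2 := rfl

theorem mem_ivUnion (L : List (Int × Int)) (y : Int) :
    y ∈ ivUnion L ↔ ∃ p ∈ L, p.1 ≤ y ∧ y ≤ p.2 := by
  induction L with
  | nil => simp [ivUnion]
  | cons q L ih =>
    rw [ivUnion_cons, Finset.mem_union, Finset.mem_Icc]
    constructor
    · rintro (h | h)
      · exact ⟨q, List.mem_cons_self .., h⟩
      · obtain ⟨p, hp, h⟩ := ih.1 h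
        exact ⟨p, List.mem_cons_of_mem _ hp, h⟩
    · rintro ⟨p, hp, h⟩
      rcases List.mem_cons.1 hp with rfl | hp
      · exact Or.inl h
      · exact Or.inr (ih.2 ⟨p, hp, h⟩)

theorem ivUnion_perm {L L' : List (Int × Int)} (h : L.Perm L') : ivUnion L = ivUnion L' := by
  ext y; rw [mem_ivUnion, mem_ivUnion]
  constructor <;> rintro ⟨p, hp, h1, h2⟩
  · exact ⟨p, h.mem_iff.1 hp, h1, h2⟩
  · exact ⟨p, h.mem_iff.2 hp, h1, h2⟩

theorem insertBy_pairwise_fst (before : (Int × Int) → (Int × Int) → Bool)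
    (hT : ∀ a b, before a b = true → a.1 ≤ b.1)
    (hF : ∀ a b, before a b = false → b.1 ≤ a.1)
    (x : Int × Int) : ∀ ys : List (Int × Int), ys.Pairwise (fun a b => a.1 ≤ b.1) →
    (PySem.List.insertBy before x ys).Pairwise (fun a b => a.1 ≤ b.1) := by
  intro ys h
  induction ys with
  | nil => simp [PySem.List.insertBy]
  | cons y ys ih =>
    rw [List.pairwise_cons] at h
    rw [PySem.List.insertBy.eq_2]
    cases hxy : before x y with
    | true =>
      rw [if_pos rfl]
      refine List.pairwise_cons.2 ⟨?_, List.pairwise_cons.2 ⟨h.1, h.2⟩⟩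
      intro z hz
      rcases List.mem_cons.1 hz with rfl | hz
      · exact hT _ _ hxy
      · exact le_trans (hT _ _ hxy) (h.1 z hz)
    | false =>
      rw [if_neg (by simp)]
      refine List.pairwise_cons.2 ⟨?_, ih h.2⟩
      intro z hz
      rcases (PySem.List.insertBy_mem_iff _ _ _ _).1 hz with rfl | hz
      · exact hF _ _ hxy
      · exact h.1 z hz

theorem foldl_insertBy_pairwise_fst (before : (Int × Int) → (Int × Int) → Bool)
    (hT : ∀ a b, before a b = true → a.1 ≤ b.1)
    (hF : ∀ a b, before a b = false → b.1 ≤ a.1) :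
    ∀ (xs acc : List (Int × Int)), acc.Pairwise (fun a b => a.1 ≤ b.1) →
    (xs.foldl (fun acc x => PySem.List.insertBy before x acc) acc).Pairwise
      (fun a b => a.1 ≤ b.1) := by
  intro xs
  induction xs with
  | nil => intro acc h; exact h
  | cons x xs ih =>
    intro acc h
    exact ih _ (insertBy_pairwise_fst before hT hF x acc h)

theorem sorted2_pairwise_fst (xs : List (Int × Int)) :
    (PySem.List.sorted2 xs Prod.fst Prod.snd).Pairwise (fun a b => a.1 ≤ b.1) := by
  show (xs.foldl (fun acc x => PySem.List.insertBy
      (fun a b => decide (a.1 < b.1) || (!decide (b.1 < a.1) && decide (a.2 < b.2))) x acc)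
      []).Pairwise (fun a b => a.1 ≤ b.1)
  apply foldl_insertBy_pairwise_fst
  · intro a b hab
    simp only [Bool.or_eq_true, Bool.and_eq_true, Bool.not_eq_true', decide_eq_true_eq,
      decide_eq_false_iff_not] at hab
    omega
  · intro a b hab
    simp only [Bool.or_eq_false_iff, Bool.and_eq_false_iff, Bool.not_eq_false',
      decide_eq_false_iff_not, decide_eq_true_eq] at hab
    omega
  · exact List.Pairwise.nil

theorem scan_fst (points : List (List Int)) (line : Int) :
    (pvScan points line).1
      = (points.filter (fun pt => decide (pvDsl line pt ≤ pvDsb pt))).map (pvIv line) := by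
  unfold pvScan
  rw [PySem.List.foldl_prod_mk
    (f := fun lst point => if pvDsl line point ≤ pvDsb point then lst ++ [pvIv line point] else lst)
    (g := fun s point => if PySem.List.pyGetD point 3 0 = line then
      PySem.Set.add s (PySem.List.pyGetD point 2 0, PySem.List.pyGetD point 3 0) else s)]
  rw [PySem.List.foldl_append_ite (p := fun point => pvDsl line point ≤ pvDsb point)
    (f := pvIv line)]
  simp

-- the merge loop of A with accumulator closed ++ [(a,b)] sums to mergeRec
theorem mergeFold_sum (ls : List (Int × Int)) (closed : List (Int × Int)) (a b : Int) :
    ((ls.foldl (fun res p =>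
      match res.getLast? with
      | some last => if p.1 ≤ last.2 then res.dropLast ++ [(last.1, max last.2 p.2)] else res ++ [p]
      | none => res ++ [p]) (closed ++ [(a, b)])).map (fun p => p.2 - p.1 + 1)).sum
    = ((closed.map (fun p => p.2 - p.1 + 1)).sum) + mergeRec a b ls := by
  induction ls generalizing closed a b with
  | nil =>
    simp [mergeRec]
  | cons q ls ih =>
    obtain ⟨lo, hi⟩ := q
    rw [List.foldl_cons]
    simp only [List.getLast?_concat, List.dropLast_concat]
    by_cases h : lo ≤ b
    · rw [if_pos h, ih, mergeRec, if_pos h]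
    · rw [if_neg h]
      rw [ih]
      rw [mergeRec, if_neg h]
      simp only [List.map_append, List.sum_append, List.map_cons, List.map_nil, List.sum_cons,
        List.sum_nil]
      ring

theorem mergeRec_card (ls : List (Int × Int)) (a b : Int) (hab : a ≤ b)
    (hel : ∀ p ∈ ls, a ≤ p.1 ∧ p.1 ≤ p.2)
    (hsort : ls.Pairwise (fun p q => p.1 ≤ q.1)) :
    mergeRec a b ls = ((Finset.Icc a b ∪ ivUnion ls).card : Int) := by
  induction ls generalizing a b with
  | nil =>
    simp only [ivUnion, List.foldr_nil, Finset.union_empty, mergeRec, Int.card_Icc]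
    omega
  | cons q ls ih =>
    obtain ⟨lo, hi⟩ := q
    rw [List.pairwise_cons] at hsort
    obtain ⟨halo, hlohi⟩ := hel (lo, hi) (List.mem_cons_self ..)
    have hel' : ∀ p ∈ ls, lo ≤ p.1 ∧ p.1 ≤ p.2 := fun p hp =>
      ⟨hsort.1 p hp, (hel p (List.mem_cons_of_mem _ hp)).2⟩
    rw [ivUnion_cons]
    by_cases h : lo ≤ b
    · rw [mergeRec, if_pos h]
      rw [ih a (max b hi) (le_trans hab (le_max_left _ _))
        (fun p hp => ⟨(hel p (List.mem_cons_of_mem _ hp)).1, (hel p (List.mem_cons_of_mem _ hp)).2⟩)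
        hsort.2]
      congr 2
      rw [← Finset.union_assoc]
      congr 1
      ext z
      simp only [Finset.mem_union, Finset.mem_Icc]
      omega
    · rw [mergeRec, if_neg h]
      rw [ih lo hi hlohi hel' hsort.2]
      have hdisj : Disjoint (Finset.Icc a b) (Finset.Icc lo hi ∪ ivUnion ls) := by
        rw [Finset.disjoint_left]
        intro z hz1 hz2
        rw [Finset.mem_Icc] at hz1
        rw [Finset.mem_union] at hz2
        rcases hz2 with hz2 | hz2
        · rw [Finset.mem_Icc] at hz2; omega
        · obtain ⟨p, hp, hzp⟩ := (mem_ivUnion ls z).1 hz2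
          have := hel' p hp
          omega
      rw [Finset.card_union_of_disjoint hdisj]
      push_cast
      rw [Int.card_Icc]
      omega

theorem mergeSum_card (L : List (Int × Int)) (hne : L ≠ [])
    (hiv : ∀ p ∈ L, p.1 ≤ p.2) :
    pvMergeSum L = ((ivUnion L).card : Int) := by
  unfold pvMergeSum
  have hperm := PySem.List.sorted2_perm L Prod.fst Prod.snd false
  have hpair := sorted2_pairwise_fst L
  rcases hcase : PySem.List.sorted2 L Prod.fst Prod.snd with _ | ⟨⟨a, b⟩, ls⟩
  · rw [hcase] at hperm
    exact absurd hperm.symm.eq_nil hne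
  · rw [hcase] at hperm hpair
    rw [List.pairwise_cons] at hpair
    simp only []
    rw [List.foldl_cons, PySem.List.foldl_add (g := fun p : Int × Int => p.2 - p.1 + 1)]
    have hab : a ≤ b := hiv (a, b) (hperm.subset (List.mem_cons_self ..))
    have hel : ∀ p ∈ ls, a ≤ p.1 ∧ p.1 ≤ p.2 := fun p hp =>
      ⟨hpair.1 p hp, hiv p (hperm.subset (List.mem_cons_of_mem _ hp))⟩
    have hfold := mergeFold_sum ls [] a b
    simp only [List.map_nil, List.sum_nil, zero_add] at hfold
    show 0 + ((List.foldl _ (([] : List (Int × Int)) ++ [(a, b)]) ls).map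
      (fun p : Int × Int => p.2 - p.1 + 1)).sum = _
    rw [hfold, mergeRec_card ls a b hab hel hpair.2,
      show Finset.Icc a b ∪ ivUnion ls = ivUnion ((a, b) :: ls) from rfl, ivUnion_perm hperm]
    simp

theorem sweep_foldl_fst (es : List (Int × Int)) (c a p : Int) :
    (es.foldl (fun (acc : Int × Int × Int) e =>
      (if acc.2.1 > 0 then acc.1 + (e.1 - acc.2.2) else acc.1, acc.2.1 + e.2, e.1))
      (c, a, p)).1 = c + sweepGo a p es := by
  induction es generalizing c a p with
  | nil => simp [sweepGo]
  | cons e es ih =>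
    obtain ⟨x, d⟩ := e
    rw [List.foldl_cons, ih, sweepGo]
    split_ifs <;> ring

theorem sweepGo_card (es : List (Int × Int)) (a p M : Int)
    (hsort : es.Pairwise (fun e f => e.1 ≤ f.1))
    (hge : ∀ e ∈ es, p ≤ e.1) (hle : ∀ e ∈ es, e.1 ≤ M) (hpM : p ≤ M)
    (htot : a + (es.map Prod.snd).sum = 0) :
    sweepGo a p es
      = (((Finset.Icc p (M - 1)).filter (fun y => 0 < a + deltaUpTo es y)).card : Int) := by
  induction es generalizing a p with
  | nil =>
    have ha : a = 0 := by simpa using htot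
    subst ha
    simp [sweepGo, deltaUpTo]
  | cons e es ih =>
    obtain ⟨x, d⟩ := e
    rw [List.pairwise_cons] at hsort
    have hpx : p ≤ x := hge _ (List.mem_cons_self ..)
    have hxM : x ≤ M := hle _ (List.mem_cons_self ..)
    have hfst : ∀ f ∈ es, x ≤ f.1 := hsort.1
    have hIcc : Finset.Icc p (M - 1) = Finset.Icc p (x - 1) ∪ Finset.Icc x (M - 1) := by
      ext z
      simp only [Finset.mem_Icc, Finset.mem_union]
      omega
    have hdisj : Disjoint
        ((Finset.Icc p (x - 1)).filter (fun y => 0 < a + deltaUpTo ((x, d) :: es) y))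
        ((Finset.Icc x (M - 1)).filter (fun y => 0 < a + deltaUpTo ((x, d) :: es) y)) := by
      rw [Finset.disjoint_left]
      intro z hz1 hz2
      rw [Finset.mem_filter, Finset.mem_Icc] at hz1 hz2
      omega
    rw [hIcc, Finset.filter_union, Finset.card_union_of_disjoint hdisj]
    -- low part: no event has fired yet
    have hlow : ∀ y ∈ Finset.Icc p (x - 1), deltaUpTo ((x, d) :: es) y = 0 := by
      intro y hy
      rw [Finset.mem_Icc] at hy
      have : List.filter (fun e => decide (e.1 ≤ y)) ((x, d) :: es) = [] := by
        rw [List.filter_eq_nil_iff]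
        intro e he
        rcases List.mem_cons.1 he with rfl | he
        · simp; omega
        · have := hfst e he
          simp
          omega
      rw [deltaUpTo, this]
      simp
    have hlowcard : (((Finset.Icc p (x - 1)).filter
        (fun y => 0 < a + deltaUpTo ((x, d) :: es) y)).card : Int)
        = if a > 0 then x - p else 0 := by
      by_cases ha : a > 0
      · rw [if_pos ha]
        rw [Finset.filter_true_of_mem (fun y hy => by rw [hlow y hy]; omega)]
        rw [Int.card_Icc]
        omega
      · rw [if_neg ha]
        rw [Finset.filter_false_of_mem (fun y hy => by rw [hlow y hy]; omega)]
        simp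
    -- high part: the first event has fired
    have hhigh : (Finset.Icc x (M - 1)).filter (fun y => 0 < a + deltaUpTo ((x, d) :: es) y)
        = (Finset.Icc x (M - 1)).filter (fun y => 0 < (a + d) + deltaUpTo es y) := by
      apply Finset.filter_congr
      intro y hy
      rw [Finset.mem_Icc] at hy
      have : deltaUpTo ((x, d) :: es) y = d + deltaUpTo es y := by
        rw [deltaUpTo, deltaUpTo, List.filter_cons, if_pos (by simpa using hy.1)]
        simp
      rw [this]
      constructor <;> intro h <;> simp at h ⊢ <;> omega
    have htot' : (a + d) + (es.map Prod.snd).sum = 0 := by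
      rw [List.map_cons, List.sum_cons] at htot
      omega
    rw [hhigh]
    push_cast
    rw [← ih (a + d) x hsort.2 hfst (fun e he => hle e (List.mem_cons_of_mem _ he)) hxM htot']
    rw [sweepGo, hlowcard]

theorem sum_snd_events (L : List (Int × Int)) :
    ((L.flatMap (fun p : Int × Int => [(p.1, (1 : Int)), (p.2 + 1, (-1 : Int))])).map
      Prod.snd).sum = 0 := by
  induction L with
  | nil => simp
  | cons q L ih => simp at ih ⊢; omega

theorem deltaUpTo_flatMap (L : List (Int × Int)) (y : Int)
    (hiv : ∀ p ∈ L, p.1 ≤ p.2) :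
    deltaUpTo (L.flatMap (fun p : Int × Int => [(p.1, (1 : Int)), (p.2 + 1, (-1 : Int))])) y
      = (L.countP (fun p => decide (p.1 ≤ y ∧ y ≤ p.2)) : Int) := by
  induction L with
  | nil => simp [deltaUpTo]
  | cons q L ih =>
    have hq := hiv q (List.mem_cons_self ..)
    rw [List.flatMap_cons, deltaUpTo, List.filter_append, List.map_append, List.sum_append]
    rw [show ((List.filter (fun e => decide (e.1 ≤ y))
        (L.flatMap (fun p : Int × Int => [(p.1, (1 : Int)), (p.2 + 1, (-1 : Int))]))).map
        Prod.snd).sum = deltaUpTo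
        (L.flatMap (fun p : Int × Int => [(p.1, (1 : Int)), (p.2 + 1, (-1 : Int))])) y from rfl]
    rw [ih (fun p hp => hiv p (List.mem_cons_of_mem _ hp)), List.countP_cons]
    by_cases h1 : q.1 ≤ y <;> by_cases h2 : y ≤ q.2 <;>
      simp [List.filter, h1, h2, show (q.2 + 1 ≤ y ↔ ¬ y ≤ q.2) from by omega] <;> omega

theorem sweepSum_card (L : List (Int × Int)) (hne : L ≠ [])
    (hiv : ∀ p ∈ L, p.1 ≤ p.2) :
    pvSweepSum L = ((ivUnion L).card : Int) := by
  unfold pvSweepSum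
  rw [PySem.List.foldl_append_eq_flatMap
    (g := fun p : Int × Int => [(p.1, (1 : Int)), (p.2 + 1, (-1 : Int))])]
  rw [List.nil_append]
  have hperm := PySem.List.sorted2_perm
    (L.flatMap (fun p : Int × Int => [(p.1, (1 : Int)), (p.2 + 1, (-1 : Int))]))
    Prod.fst Prod.snd false
  have hpair := sorted2_pairwise_fst
    (L.flatMap (fun p : Int × Int => [(p.1, (1 : Int)), (p.2 + 1, (-1 : Int))]))
  rcases hcase : PySem.List.sorted2
      (L.flatMap (fun p : Int × Int => [(p.1, (1 : Int)), (p.2 + 1, (-1 : Int))]))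
      Prod.fst Prod.snd with _ | ⟨⟨x0, d0⟩, tail⟩
  · rw [hcase] at hperm
    have : L.flatMap (fun p : Int × Int => [(p.1, (1 : Int)), (p.2 + 1, (-1 : Int))]) = [] :=
      hperm.symm.eq_nil
    rw [List.flatMap_eq_nil_iff] at this
    rcases L with _ | ⟨q, L⟩
    · exact absurd rfl hne
    · exact absurd (this q (List.mem_cons_self ..)) (by simp)
  · rw [hcase] at hperm hpair
    rw [sweep_foldl_fst, hcase]
    rw [PySem.List.pyGetD_zero_cons]
    have hge : ∀ e ∈ (x0, d0) :: tail, (x0, d0).1 ≤ e.1 := by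
      rw [List.pairwise_cons] at hpair
      intro e he
      rcases List.mem_cons.1 he with rfl | he
      · exact le_refl _
      · exact hpair.1 e he
    have hmemE : ∀ e, e ∈ (x0, d0) :: tail ↔
        e ∈ L.flatMap (fun p : Int × Int => [(p.1, (1 : Int)), (p.2 + 1, (-1 : Int))]) :=
      fun e => hperm.mem_iff
    set events := L.flatMap (fun p : Int × Int => [(p.1, (1 : Int)), (p.2 + 1, (-1 : Int))])
      with hev
    set M := (events.map Prod.fst).foldl max x0 with hM
    have hle : ∀ e ∈ (x0, d0) :: tail, e.1 ≤ M := by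
      intro e he
      exact (PySem.List.le_foldl_max (events.map Prod.fst) x0).2 e.1
        (List.mem_map.2 ⟨e, (hmemE e).1 he, rfl⟩)
    have hpM : (x0, d0).1 ≤ M := (PySem.List.le_foldl_max (events.map Prod.fst) x0).1
    have htot : (0 : Int) + (((x0, d0) :: tail).map Prod.snd).sum = 0 := by
      rw [zero_add, (hperm.map Prod.snd).sum_eq, hev, sum_snd_events]
    rw [sweepGo_card ((x0, d0) :: tail) 0 (x0, d0).1 M hpair hge hle hpM htot]
    have hset : (Finset.Icc (x0, d0).1 (M - 1)).filter
        (fun y => 0 < 0 + deltaUpTo ((x0, d0) :: tail) y) = ivUnion L := by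
      ext y
      rw [Finset.mem_filter, Finset.mem_Icc, mem_ivUnion]
      have hdelta : deltaUpTo ((x0, d0) :: tail) y = deltaUpTo events y := by
        rw [deltaUpTo, deltaUpTo, (hperm.filter _).map Prod.snd |>.sum_eq]
      rw [hdelta, zero_add, deltaUpTo_flatMap L y hiv]
      constructor
      · rintro ⟨-, hpos⟩
        have : 0 < L.countP (fun p => decide (p.1 ≤ y ∧ y ≤ p.2)) := by exact_mod_cast hpos
        obtain ⟨q, hq, hqy⟩ := List.countP_pos_iff.1 this
        exact ⟨q, hq, by simpa using hqy⟩
      · rintro ⟨q, hq, h1, h2⟩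
        refine ⟨⟨?_, ?_⟩, ?_⟩
        · have : (q.1, (1 : Int)) ∈ events := List.mem_flatMap.2 ⟨q, hq, by simp⟩
          have := hge _ ((hmemE _).2 this)
          simpa using le_trans this h1
        · have : (q.2 + 1, (-1 : Int)) ∈ events := List.mem_flatMap.2 ⟨q, hq, by simp⟩
          have := hle _ ((hmemE _).2 this)
          simp at this
          omega
        · have : 0 < L.countP (fun p => decide (p.1 ≤ y ∧ y ≤ p.2)) :=
            List.countP_pos_iff.2 ⟨q, hq, by simpa using And.intro h1 h2⟩
          exact_mod_cast this
    rw [hset, zero_add]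

-- ===== VERDICT (by name: the statement is the Claim_ definition above) =====
theorem n_positions_with_no_beacon_spec : Claim_equal_n_positions_with_no_beacon := by
  intro points line _hdom hpre
  unfold Spec_n_positions_with_no_beacon
  rw [portA_eq, portB_eq]
  have hscan := scan_fst points line
  have hiv : ∀ p ∈ (pvScan points line).1, p.1 ≤ p.2 := by
    intro p hp
    rw [hscan] at hp
    obtain ⟨pt, hpt, rfl⟩ := List.mem_map.1 hp
    have := (List.mem_filter.1 hpt).2
    simp only [decide_eq_true_eq] at this
    simp only [pvIv]
    omega
  have hne : (pvScan points line).1 ≠ [] := by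
    rw [hscan]
    obtain ⟨p, hp, hcond⟩ := hpre.2
    have : pvDsl line p ≤ pvDsb p := by
      simpa [pvDsl, pvDsb, PySem.List.pyGetD_ofNat'] using hcond
    simp only [ne_eq, List.map_eq_nil_iff, List.filter_eq_nil_iff, not_forall]
    exact ⟨p, hp, by simpa using this⟩
  rw [mergeSum_card _ hne hiv, sweepSum_card _ hne hiv]
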